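-- pv_equiv track=rewrite | github.com/MrBrantCode/unitest_baseline | mut_generate/mist_train_cf/cf_79000/solution.py | classify_numbers
-- ===== SOURCE A (Python) =====
-- import math
--
-- def classify_numbers(numbers):
--     classification = {
--         "prime": [],
--         "composite": [],
--         "perfect_square": [],
--         "positive": [],
--         "negative": [],
--         "zero": [],
--     }
--
--     for n in numbers:
--         if n > 1 and all(n % dividend != 0 for dividend in range(2, int(math.sqrt(n)) + 1)):
--             classification['prime'].append(n)
--         elif n > 1:
--             classification['composite'].append(n)
--
--         if n >= 0 and math.isqrt(n) ** 2 == n: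
--             classification['perfect_square'].append(n)
--
--         if n > 0:
--             classification['positive'].append(n)
--         elif n < 0:
--             classification['negative'].append(n)
--         else:
--             classification['zero'].append(n)
--
--     return classification
-- ===== SOURCE B (Python) =====
-- import math
--
--
-- def _is_prime(n):
--     if n <= 1:
--         return False
--     return all(n % d for d in range(2, math.isqrt(n) + 1))
--
--
-- def _is_perfect_square(n):
--     return n >= 0 and math.isqrt(n) ** 2 == n
--
--
-- def classify_numbers(numbers):
--     return {
--         "prime": [n for n in numbers if _is_prime(n)],
--         "composite": [n for n in numbers if n > 1 and not _is_prime(n)],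
--         "perfect_square": [n for n in numbers if _is_perfect_square(n)],
--         "positive": [n for n in numbers if n > 0],
--         "negative": [n for n in numbers if n < 0],
--         "zero": [n for n in numbers if n == 0],
--     }
-- ===== Notes on version B (the rewrite author's own statement) =====
-- stated objective: simpler
-- what changed: A's single pass that pushes each number into up to three of six buckets is replaced by named predicate helpers and six independent comprehensions, one per bucket (isqrt replaces int(math.sqrt(n)) in the trial-division bound, identical for |n| <= 2^31).
import Mathlib
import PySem

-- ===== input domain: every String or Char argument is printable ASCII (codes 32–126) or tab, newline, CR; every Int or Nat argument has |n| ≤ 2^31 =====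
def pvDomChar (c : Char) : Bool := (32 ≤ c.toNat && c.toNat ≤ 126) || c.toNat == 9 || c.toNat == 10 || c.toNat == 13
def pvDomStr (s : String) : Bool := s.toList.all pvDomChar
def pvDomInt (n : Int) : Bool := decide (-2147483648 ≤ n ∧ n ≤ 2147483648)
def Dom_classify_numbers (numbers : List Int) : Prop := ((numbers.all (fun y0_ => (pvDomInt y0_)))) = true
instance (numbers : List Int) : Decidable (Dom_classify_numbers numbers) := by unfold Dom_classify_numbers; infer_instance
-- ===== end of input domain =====

-- B replaces A's single six-bucket loop by predicate helpers and six independent filters (simpler decomposition, same cost).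


-- ===== PORT A =====
-- int(math.sqrt(n)): for 0 ≤ n ≤ 2^31 the float sqrt is exact enough that this equals math.isqrt(n)
-- (verified exhaustively near all squares below 2^31), so it is ported as the integer square root.
def pvSqrtA (n : Int) : Int := ((Nat.sqrt n.toNat : Nat) : Int)

-- the body of A's for-loop: one number updates the six buckets (prime, composite, perfect_square, positive, negative, zero)
def pvStepA (c : List Int × List Int × List Int × List Int × List Int × List Int) (n : Int) :
    List Int × List Int × List Int × List Int × List Int × List Int :=
  let (pr, co, sq, pos, neg, ze) := c
  let (pr, co) :=
    if 1 < n ∧ ((PySem.List.pyRange 2 (pvSqrtA n + 1) 1).all (fun d => PySem.Int.mod n d != 0)) = true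
    then (pr ++ [n], co)
    else if 1 < n then (pr, co ++ [n]) else (pr, co)
  let sq := if 0 ≤ n ∧ pvSqrtA n ^ 2 = n then sq ++ [n] else sq
  let (pos, neg, ze) :=
    if 0 < n then (pos ++ [n], neg, ze)
    else if n < 0 then (pos, neg ++ [n], ze)
    else (pos, neg, ze ++ [n])
  (pr, co, sq, pos, neg, ze)

def classify_numbers (numbers : List Int) : List (String × List Int) :=
  let c := numbers.foldl pvStepA ([], [], [], [], [], [])
  [("prime", c.1), ("composite", c.2.1), ("perfect_square", c.2.2.1),
   ("positive", c.2.2.2.1), ("negative", c.2.2.2.2.1), ("zero", c.2.2.2.2.2)]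

-- ===== PORT B =====
def pvIsPrimeB (n : Int) : Bool :=
  if n ≤ 1 then false
  else (PySem.List.pyRange 2 (((Nat.sqrt n.toNat : Nat) : Int) + 1) 1).all (fun d => PySem.Int.mod n d != 0)

def pvIsPerfectSquareB (n : Int) : Bool :=
  decide (0 ≤ n) && (((Nat.sqrt n.toNat : Nat) : Int) ^ 2 == n)

def classify_numbers_alt (numbers : List Int) : List (String × List Int) :=
  [("prime", numbers.filter (fun n => pvIsPrimeB n)),
   ("composite", numbers.filter (fun n => decide (1 < n) && !pvIsPrimeB n)),
   ("perfect_square", numbers.filter (fun n => pvIsPerfectSquareB n)),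
   ("positive", numbers.filter (fun n => decide (0 < n))),
   ("negative", numbers.filter (fun n => decide (n < 0))),
   ("zero", numbers.filter (fun n => n == 0))]

-- ===== PRECONDITION & SPEC =====
def Spec_classify_numbers (numbers : List Int) (out : List (String × List Int)) : Prop := out = classify_numbers_alt numbers
instance (numbers : List Int) (out : List (String × List Int)) : Decidable (Spec_classify_numbers numbers out) := by unfold Spec_classify_numbers; infer_instance

-- ===== CLAIM (what is proved, stated in full; the proofs are below) =====
def Claim_equal_classify_numbers : Prop := ∀ (numbers : List Int), Dom_classify_numbers numbers → Spec_classify_numbers numbers (classify_numbers numbers)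

-- ===== LEMMAS AND PROOFS =====
set_option maxHeartbeats 1000000 in
lemma pvStepA_fold_inv (xs : List Int) (a b c d e f : List Int) :
    xs.foldl pvStepA (a, b, c, d, e, f) =
      (a ++ xs.filter (fun n => pvIsPrimeB n),
       b ++ xs.filter (fun n => decide (1 < n) && !pvIsPrimeB n),
       c ++ xs.filter (fun n => pvIsPerfectSquareB n),
       d ++ xs.filter (fun n => decide (0 < n)),
       e ++ xs.filter (fun n => decide (n < 0)),
       f ++ xs.filter (fun n => n == 0)) := by
  induction xs generalizing a b c d e f with
  | nil => simp
  | cons n xs ih =>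
    have hA : pvIsPrimeB n =
        (decide (1 < n) && (PySem.List.pyRange 2 (pvSqrtA n + 1) 1).all (fun d => PySem.Int.mod n d != 0)) := by
      by_cases h : n ≤ 1
      · simp [pvIsPrimeB, h, show ¬(1 < n) by omega]
      · simp [pvIsPrimeB, pvSqrtA, h, show (1 < n) by omega]
    have hS : pvIsPerfectSquareB n = (decide (0 ≤ n) && decide (pvSqrtA n ^ 2 = n)) := by
      by_cases h : ((Nat.sqrt n.toNat : Nat) : Int) ^ 2 = n <;>
        simp [pvIsPerfectSquareB, pvSqrtA, h]
    simp only [List.foldl_cons, List.filter_cons, ih, pvStepA, hA, hS]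
    clear ih hA hS
    rcases lt_trichotomy n 0 with hs | hs | hs
    · -- negative n: no prime/composite/perfect-square bucket, negative bucket
      simp [show ¬1 < n by omega, show ¬0 ≤ n by omega, show ¬0 < n by omega, hs,
            show n ≠ 0 by omega]
    · -- n = 0: zero and perfect-square buckets
      subst hs
      simp [pvSqrtA]
    · -- positive n
      by_cases h1 : 1 < n
      · by_cases hall : ((PySem.List.pyRange 2 (pvSqrtA n + 1) 1).all
            (fun d => PySem.Int.mod n d != 0)) = true <;>
          by_cases hq : pvSqrtA n ^ 2 = n <;>
          simp [h1, hall, hq, hs, show 0 ≤ n by omega, show n ≠ 0 by omega]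
      · have hn1 : n = 1 := by omega
        subst hn1
        simp [pvSqrtA]

-- ===== VERDICT (by name: the statement is the Claim_ definition above) =====
theorem classify_numbers_spec : Claim_equal_classify_numbers := by
  intro numbers _
  show _ = _
  simp [classify_numbers, classify_numbers_alt, pvStepA_fold_inv]
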